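-- pv_equiv track=rewrite | github.com/egarsan176/GitLinkedIn | Python/RepresentarDistanciaMasCorta.py | representarDistanciaMasCorta
-- ===== SOURCE A (Python) =====
-- def representarDistanciaMasCorta(palabra, caracter):
--
--     palabra = palabra.lower()
--     caracter = caracter.lower()
--
--     pos = []
--     distancia = []
--
--     for i in range(len(palabra)):
--         if palabra[i] == caracter:  #busco las posiciones que coinciden con el caracter que estoy buscando
--             pos.append(i)           #guardo las posiciones en una lista
--
--
--
--     for i in range(len(palabra)):
--         if palabra[i] == caracter:  #si la letra es la misma que el caracter, añado un 0
--             distancia.append(0)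
--         else:
--             min = 99999999999999
--             for j in pos:           #recorro la lista de posiciones
--                 if abs(i-j) < min:  #si el valor absoluto de i-j es menor que el minimo, hago de ese el min
--                     min = abs(i-j)  #tras acabar el for, el min sera la menor distancia encontrada
--             distancia.append(min)   #guardo el resultado (el minimo) en la lista
--
--
--     return distancia
-- ===== SOURCE B (Python) =====
-- def representarDistanciaMasCorta(palabra, caracter):
--     palabra = palabra.lower()
--     caracter = caracter.lower()
--     INF = 99999999999999
--     fwd = []
--     d = INF
--     for i in range(len(palabra)):
--         if palabra[i] == caracter:
--             d = 0
--         else: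
--             d = d if d == INF else d + 1
--         fwd.append(d)
--     res = []
--     d = INF
--     for i in range(len(palabra) - 1, -1, -1):
--         if palabra[i] == caracter:
--             d = 0
--         else:
--             d = d if d == INF else d + 1
--         res.append(min(fwd[i], d))
--     res.reverse()
--     return res
-- ===== Notes on version B (the rewrite author's own statement) =====
-- stated objective: alternative
-- what changed: A collects all match positions and, for every non-matching index, scans that whole list for the minimum |i-j|; B instead makes two sentinel-tracking passes (forward distance to the previous match, backward distance to the next match, combined with min), so the per-index scan over the positions list disappears.
import Mathlib
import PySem

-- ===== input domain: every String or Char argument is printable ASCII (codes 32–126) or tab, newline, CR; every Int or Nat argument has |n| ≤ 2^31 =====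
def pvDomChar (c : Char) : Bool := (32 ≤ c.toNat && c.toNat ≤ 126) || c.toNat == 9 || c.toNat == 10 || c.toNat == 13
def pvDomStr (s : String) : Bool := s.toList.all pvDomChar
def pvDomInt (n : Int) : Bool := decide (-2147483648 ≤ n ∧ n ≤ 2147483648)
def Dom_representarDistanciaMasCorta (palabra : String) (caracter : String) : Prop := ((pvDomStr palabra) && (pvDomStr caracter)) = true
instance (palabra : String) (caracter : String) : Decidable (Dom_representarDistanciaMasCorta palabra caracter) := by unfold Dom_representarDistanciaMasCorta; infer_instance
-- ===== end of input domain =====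

-- B replaces A's per-position scan over the list of collected match positions by two
-- sentinel-tracking passes (forward then backward, combined with min); return value only —
-- neither version mutates its arguments.

-- ===== PORT A =====
def representarDistanciaMasCorta (palabra : String) (caracter : String) : List Int :=
  let l := PySem.Chars.lower palabra.toList
  let t := PySem.Chars.lower caracter.toList
  let n : Int := PySem.List.len l
  let pos : List Int := (PySem.List.pyRange 0 n 1).foldl
    (fun acc i => if [PySem.List.pyGetD l i ' '] == t then acc ++ [i] else acc) []
  (PySem.List.pyRange 0 n 1).foldl
    (fun dist i =>
      if [PySem.List.pyGetD l i ' '] == t then dist ++ [(0 : Int)]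
      else dist ++ [pos.foldl (fun mn j => if |i - j| < mn then |i - j| else mn) 99999999999999]) []

-- ===== PORT B =====
def representarDistanciaMasCorta_alt (palabra : String) (caracter : String) : List Int :=
  let l := PySem.Chars.lower palabra.toList
  let t := PySem.Chars.lower caracter.toList
  let n : Int := PySem.List.len l
  let fwd := ((PySem.List.pyRange 0 n 1).foldl
    (fun (st : Int × List Int) i =>
      let d := if [PySem.List.pyGetD l i ' '] == t then 0
               else if st.1 == 99999999999999 then st.1 else st.1 + 1
      (d, st.2 ++ [d])) (99999999999999, [])).2
  let res := ((PySem.List.pyRange (n - 1) (-1) (-1)).foldl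
    (fun (st : Int × List Int) i =>
      let d := if [PySem.List.pyGetD l i ' '] == t then 0
               else if st.1 == 99999999999999 then st.1 else st.1 + 1
      (d, st.2 ++ [min (PySem.List.pyGetD fwd i 0) d])) (99999999999999, [])).2
  res.reverse

-- ===== PRECONDITION & SPEC =====
def Spec_representarDistanciaMasCorta (palabra : String) (caracter : String) (out : List Int) : Prop := out = representarDistanciaMasCorta_alt palabra caracter
instance (palabra : String) (caracter : String) (out : List Int) : Decidable (Spec_representarDistanciaMasCorta palabra caracter out) := by unfold Spec_representarDistanciaMasCorta; infer_instance

-- ===== CLAIM (what is proved, stated in full; the proofs are below) =====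
def Claim_equal_representarDistanciaMasCorta : Prop := ∀ (palabra : String) (caracter : String), Dom_representarDistanciaMasCorta palabra caracter → Spec_representarDistanciaMasCorta palabra caracter (representarDistanciaMasCorta palabra caracter)

-- ===== LEMMAS AND PROOFS =====

def pvMatch (l t : List Char) (j : Nat) : Bool := [l.getD j ' '] == t
def pvLm (l t : List Char) : Nat → Option Nat
  | 0 => none
  | k + 1 => if pvMatch l t k then some k else pvLm l t k
def pvNm (l t : List Char) (k : Nat) : Option Nat :=
  if _h : k < l.length then (if pvMatch l t k then some k else pvNm l t (k + 1)) else none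
  termination_by l.length - k
def pvFd (l t : List Char) : Nat → Int
  | 0 => 99999999999999
  | k + 1 => if pvMatch l t k then 0
             else if pvFd l t k == 99999999999999 then pvFd l t k else pvFd l t k + 1
def pvBd (l t : List Char) (k : Nat) : Int :=
  if _h : k < l.length then
    (if pvMatch l t k then 0
     else if pvBd l t (k + 1) == 99999999999999 then pvBd l t (k + 1) else pvBd l t (k + 1) + 1)
  else 99999999999999
  termination_by l.length - k

theorem pvLm_lt (l t : List Char) (k : Nat) {j : Nat} (h : pvLm l t k = some j) :
    j < k ∧ pvMatch l t j = true := by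
  induction k with
  | zero => simp [pvLm] at h
  | succ k ih =>
    by_cases hm : pvMatch l t k
    · simp only [pvLm, hm, if_true, Option.some.injEq] at h
      subst h; exact ⟨by omega, hm⟩
    · simp only [pvLm, hm, Bool.false_eq_true, if_false] at h
      rcases ih h with ⟨h1, h2⟩
      exact ⟨by omega, h2⟩

theorem pvStep (x : Int) :
    (if (min x 99999999999999 == (99999999999999 : Int)) = true then min x 99999999999999
     else min x 99999999999999 + 1) = min (x + 1) 99999999999999 := by
  rcases lt_trichotomy x 99999999999999 with h | h | h
  · rw [min_eq_left h.le]
    have hc : (x == (99999999999999 : Int)) = false := beq_eq_false_iff_ne.mpr h.ne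
    rw [hc]
    simp only [Bool.false_eq_true, if_false]
    rw [min_eq_left (by linarith)]
  · subst h
    simp only [min_self, beq_self_eq_true, if_true]
    rw [min_eq_right (by linarith)]
  · rw [min_eq_right h.le]
    simp only [beq_self_eq_true, if_true]
    rw [min_eq_right (by linarith)]

theorem pvFd_char (l t : List Char) (k : Nat) :
    pvFd l t k = match pvLm l t k with
      | none => 99999999999999
      | some j => min ((k : Int) - 1 - j) 99999999999999 := by
  induction k with
  | zero => simp [pvFd, pvLm]
  | succ k ih =>
    by_cases hm : pvMatch l t k
    · simp [pvFd, pvLm, hm]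
    · rw [pvFd, pvLm]
      simp only [hm, Bool.false_eq_true, if_false]
      cases hlm : pvLm l t k with
      | none =>
        rw [hlm] at ih; dsimp only at ih
        rw [ih]; simp
      | some j =>
        rw [hlm] at ih; dsimp only at ih
        rw [ih]
        dsimp only
        have hy : ((k + 1 : Nat) : Int) - 1 - (j : Int) = ((k : Int) - 1 - (j : Int)) + 1 := by
          push_cast; ring
        rw [hy]
        exact pvStep _

theorem pvBd_char (l t : List Char) (k : Nat) :
    pvBd l t k = match pvNm l t k with
      | none => 99999999999999
      | some j => min ((j : Int) - k) 99999999999999 := by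
  induction hn : l.length - k generalizing k with
  | zero =>
    rw [pvBd, pvNm]
    split
    · omega
    · simp
  | succ n ih =>
    rw [pvBd, pvNm]
    split
    · next hk =>
      by_cases hm : pvMatch l t k
      · simp [hm]
      · simp only [hm, Bool.false_eq_true, if_false]
        have ih' := ih (k + 1) (by omega)
        cases hnm : pvNm l t (k + 1) with
        | none =>
          rw [hnm] at ih'; dsimp only at ih'
          rw [ih']; simp
        | some j =>
          rw [hnm] at ih'; dsimp only at ih'
          rw [ih']
          dsimp only
          have hy : ((j : Int) - ((k : Int))) = ((j : Int) - ((k + 1 : Nat) : Int)) + 1 := by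
            push_cast; ring
          rw [hy]
          exact pvStep _
    · simp

theorem pvMinStep (a b : Int) (h : b ≤ a) :
    min (min a 99999999999999) b = min b 99999999999999 := by
  rcases le_total b 99999999999999 with hb | hb
  · rw [min_eq_left hb, min_eq_right (le_min h hb)]
  · rw [min_eq_right hb, min_eq_right (hb.trans h), min_eq_left hb]

theorem pvMinCap (A x : Int) (hA : A ≤ 99999999999999) :
    min A x = min A (min x 99999999999999) := by
  rcases le_total x 99999999999999 with hx | hx
  · rw [min_eq_left hx]
  · rw [min_eq_right hx, min_eq_left hA, min_eq_left (hA.trans hx)]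

theorem pv_foldl_min_eq_self {L : List Int} {a : Int} (h : ∀ x ∈ L, a ≤ x) :
    L.foldl min a = a := by
  rcases PySem.List.foldl_min_mem L a with h1 | h1
  · exact h1
  · exact le_antisymm (PySem.List.foldl_min_le L a).1 (h _ h1)

theorem pv_foldA_left (l t : List Char) (i : Nat) (k : Nat) (hk : k ≤ i + 1) :
    (((List.range k).filter (pvMatch l t)).map (fun (j : Nat) => |(i : Int) - (j : Int)|)).foldl min 99999999999999
      = (match pvLm l t k with
         | none => (99999999999999 : Int)
         | some j => min ((i : Int) - j) 99999999999999) := by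
  induction k with
  | zero => simp [pvLm]
  | succ k ih =>
    rw [List.range_succ, List.filter_append, List.map_append, List.foldl_append]
    by_cases hm : pvMatch l t k
    · simp only [List.filter_cons, hm, if_true, List.filter_nil, List.map_cons, List.map_nil,
        List.foldl_cons, List.foldl_nil, pvLm]
      rw [ih (by omega)]
      have habs : |(i : Int) - (k : Int)| = (i : Int) - k := by
        rw [abs_of_nonneg (sub_nonneg.mpr (Nat.cast_le.mpr (by omega)))]
      rw [habs]
      cases hlm : pvLm l t k with
      | none => exact min_comm _ _
      | some j =>
        have hj := (pvLm_lt l t k hlm).1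
        dsimp only
        exact pvMinStep _ _ (sub_le_sub_left (Nat.cast_le.mpr hj.le) _)
    · simp only [List.filter_cons, hm, Bool.false_eq_true, if_false, List.filter_nil,
        List.map_nil, List.foldl_nil, pvLm]
      rw [ih (by omega)]

theorem pv_foldA_right (l t : List Char) (i c k : Nat) (hik : i < k) (hck : c + k = l.length)
    (A : Int) (hA : A ≤ 99999999999999) :
    ((((List.range c).map (fun x => k + x)).filter (pvMatch l t)).map
        (fun (j : Nat) => |(i : Int) - (j : Int)|)).foldl min A
      = min A (match pvNm l t k with
         | none => (99999999999999 : Int)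
         | some j => min ((j : Int) - i) 99999999999999) := by
  induction c generalizing k A with
  | zero =>
    rw [pvNm, dif_neg (by omega : ¬ k < l.length)]
    simp [min_eq_left hA]
  | succ n ih =>
    have hk : k < l.length := by omega
    rw [List.range_succ_eq_map]
    simp only [List.map_cons, Nat.add_zero, List.map_map]
    have hmapeq : ((List.range n).map ((fun x => k + x) ∘ Nat.succ)) =
        (List.range n).map (fun x => (k + 1) + x) := by
      apply List.map_congr_left; intro x _; simp [Function.comp]; omega
    rw [hmapeq, pvNm]
    simp only [hk, dif_pos]
    by_cases hm : pvMatch l t k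
    · simp only [List.filter_cons, hm, if_true, List.map_cons, List.foldl_cons]
      have habs : |(i : Int) - (k : Int)| = (k : Int) - i := by
        rw [abs_sub_comm, abs_of_nonneg (sub_nonneg.mpr (Nat.cast_le.mpr hik.le))]
      rw [habs]
      have hrest : ((((List.range n).map (fun x => (k + 1) + x)).filter (pvMatch l t)).map
          (fun (j : Nat) => |(i : Int) - (j : Int)|)).foldl min (min A ((k : Int) - i))
          = min A ((k : Int) - i) := by
        apply pv_foldl_min_eq_self
        intro x hx
        simp only [List.mem_map, List.mem_filter] at hx
        rcases hx with ⟨j, ⟨hj, _⟩, rfl⟩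
        simp only [List.mem_range] at hj
        rcases hj with ⟨y, _, rfl⟩
        have habs2 : |(i : Int) - ((k + 1 + y : Nat) : Int)| = ((k + 1 + y : Nat) : Int) - i := by
          rw [abs_sub_comm, abs_of_nonneg (sub_nonneg.mpr (Nat.cast_le.mpr (by omega)))]
        rw [habs2]
        exact (min_le_right _ _).trans (sub_le_sub_right (Nat.cast_le.mpr (by omega)) _)
      rw [hrest]
      exact pvMinCap _ _ hA
    · simp only [List.filter_cons, hm, Bool.false_eq_true, if_false]
      rw [ih (k + 1) (by omega) (by omega) A hA]

def pvE (l t : List Char) (i : Nat) : Int := min (pvFd l t (i + 1)) (pvBd l t i)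

theorem pv_point (l t : List Char) (i : Nat) (hi : i < l.length) :
    (if pvMatch l t i then (0 : Int)
     else (((List.range l.length).filter (pvMatch l t)).map
        (fun (j : Nat) => |(i : Int) - (j : Int)|)).foldl min 99999999999999)
      = pvE l t i := by
  unfold pvE
  by_cases hm : pvMatch l t i
  · rw [if_pos hm]
    have h1 : pvFd l t (i + 1) = 0 := by rw [pvFd]; simp [hm]
    have h2 : pvBd l t i = 0 := by rw [pvBd]; simp [hi, hm]
    rw [h1, h2]; simp
  · rw [if_neg hm]
    have hsplit : l.length = (i + 1) + (l.length - (i + 1)) := by omega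
    rw [hsplit, List.range_add, List.filter_append, List.map_append, List.foldl_append]
    rw [pv_foldA_left l t i (i + 1) (le_refl _)]
    have hAle : (match pvLm l t (i + 1) with
         | none => (99999999999999 : Int)
         | some j => min ((i : Int) - j) 99999999999999) ≤ 99999999999999 := by
      cases pvLm l t (i + 1) with
      | none => exact le_refl _
      | some j => exact min_le_right _ _
    rw [pv_foldA_right l t i (l.length - (i + 1)) (i + 1) (by omega) (by omega) _ hAle]
    rw [pvFd_char, pvBd_char]
    have hnm : pvNm l t i = pvNm l t (i + 1) := by
      rw [pvNm, dif_pos hi, if_neg hm]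
    rw [hnm]
    cases hlm : pvLm l t (i + 1) with
    | none =>
      cases hnmv : pvNm l t (i + 1) with
      | none => rfl
      | some j' => rfl
    | some j =>
      cases hnmv : pvNm l t (i + 1) with
      | none =>
        dsimp only
        rw [show ((i + 1 : Nat) : Int) - 1 - (j : Int) = (i : Int) - (j : Int) from by push_cast; ring]
      | some j' =>
        dsimp only
        rw [show ((i + 1 : Nat) : Int) - 1 - (j : Int) = (i : Int) - (j : Int) from by push_cast; ring]

-- A's positions list
theorem pv_pos_char (l t : List Char) :
    ((PySem.List.pyRange 0 (l.length : Int) 1).foldl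
      (fun acc i => if [PySem.List.pyGetD l i ' '] == t then acc ++ [i] else acc) [])
      = ((List.range l.length).filter (pvMatch l t)).map (fun (q : Nat) => (q : Int)) := by
  rw [PySem.List.pyRange_zero_nat, PySem.List.foldl_append_if_eq_filter, List.filter_map]
  simp only [List.nil_append]
  have heq : (List.range l.length).filter
        ((fun i => [PySem.List.pyGetD l i ' '] == t) ∘ (fun q : Nat => (q : Int)))
      = (List.range l.length).filter (pvMatch l t) := by
    apply List.filter_congr
    intro j _
    simp [Function.comp, pvMatch, PySem.List.pyGetD_natCast]
  rw [heq]

theorem pv_A_char (palabra : String) (caracter : String) :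
    representarDistanciaMasCorta palabra caracter
      = (List.range (PySem.Chars.lower palabra.toList).length).map
          (pvE (PySem.Chars.lower palabra.toList) (PySem.Chars.lower caracter.toList)) := by
  unfold representarDistanciaMasCorta
  simp only [PySem.List.len_eq]
  rw [pv_pos_char]
  set l := PySem.Chars.lower palabra.toList with hl
  set t := PySem.Chars.lower caracter.toList with ht
  rw [PySem.List.pyRange_zero_nat, List.foldl_map]
  refine Eq.trans (b := (List.range l.length).foldl (fun dist k => dist ++ [pvE l t k]) []) ?_ ?_
  · apply PySem.List.foldl_congr_mem
    intro dist k hk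
    simp only [List.mem_range] at hk
    have hmeq : ([PySem.List.pyGetD l (k : Int) ' '] == t) = pvMatch l t k := by
      simp [pvMatch, PySem.List.pyGetD_natCast]
    rw [hmeq]
    have hfold : (((List.range l.length).filter (pvMatch l t)).map (fun (q : Nat) => (q : Int))).foldl
        (fun mn j => if |(k : Int) - j| < mn then |(k : Int) - j| else mn) 99999999999999
        = (((List.range l.length).filter (pvMatch l t)).map
            (fun (j : Nat) => |(k : Int) - (j : Int)|)).foldl min 99999999999999 := by
      rw [List.foldl_map, List.foldl_map]
      apply PySem.List.foldl_congr_mem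
      intro acc x _
      rcases lt_or_ge (|(k : Int) - (x : Int)|) acc with h | h
      · rw [if_pos h, min_eq_right h.le]
      · rw [if_neg (not_lt.mpr h), min_eq_left h]
    rw [hfold]
    by_cases hm : pvMatch l t k
    · rw [if_pos hm, ← pv_point l t k hk, if_pos hm]
    · rw [if_neg hm, ← pv_point l t k hk, if_neg hm]
  · rw [PySem.List.foldl_append_singleton_eq_map (pvE l t) (List.range l.length) []]
    simp

theorem pv_fwd_char (l t : List Char) (k : Nat) :
    ((PySem.List.pyRange 0 (k : Int) 1).foldl
      (fun (st : Int × List Int) i =>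
        let d := if [PySem.List.pyGetD l i ' '] == t then 0
                 else if st.1 == 99999999999999 then st.1 else st.1 + 1
        (d, st.2 ++ [d])) (99999999999999, []))
      = (pvFd l t k, (List.range k).map (fun i => pvFd l t (i + 1))) := by
  induction k with
  | zero =>
    rw [PySem.List.pyRange_one_eq_nil (by omega)]
    simp [pvFd]
  | succ k ih =>
    rw [show ((k + 1 : Nat) : Int) = (k : Int) + 1 from by push_cast; ring]
    rw [PySem.List.pyRange_one_succ_right (by positivity), List.foldl_append, ih]
    simp only [List.foldl_cons, List.foldl_nil, List.range_succ, List.map_append, List.map_cons,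
      List.map_nil]
    have hmeq : ([PySem.List.pyGetD l (k : Int) ' '] == t) = pvMatch l t k := by
      simp [pvMatch, PySem.List.pyGetD_natCast]
    rw [pvFd]
    simp only [hmeq]

theorem pv_bwd_char (l t : List Char) (fwd : List Int)
    (hf : ∀ i, i < l.length → PySem.List.pyGetD fwd (i : Int) 0 = pvFd l t (i + 1))
    (k : Nat) (hk : k ≤ l.length) (d0 : Int) (hd0 : d0 = pvBd l t k) (acc : List Int) :
    ((PySem.List.pyRange ((k : Int) - 1) (-1) (-1)).foldl
      (fun (st : Int × List Int) i =>
        let d := if [PySem.List.pyGetD l i ' '] == t then 0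
                 else if st.1 == 99999999999999 then st.1 else st.1 + 1
        (d, st.2 ++ [min (PySem.List.pyGetD fwd i 0) d])) (d0, acc)).2
      = acc ++ ((List.range k).map (pvE l t)).reverse := by
  subst hd0
  induction k generalizing acc with
  | zero =>
    rw [show ((0 : Nat) : Int) - 1 = (-1 : Int) from by norm_num]
    rw [PySem.List.pyRange_neg_one_eq_nil (by omega)]
    simp
  | succ k ih =>
    rw [show ((k + 1 : Nat) : Int) - 1 = (k : Int) from by push_cast; ring]
    rw [PySem.List.pyRange_neg_one_cons (by omega : (-1 : Int) < (k : Int))]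
    simp only [List.foldl_cons]
    have hmeq : ([PySem.List.pyGetD l (k : Int) ' '] == t) = pvMatch l t k := by
      simp [pvMatch, PySem.List.pyGetD_natCast]
    have hstate : (if [PySem.List.pyGetD l (k : Int) ' '] == t then (0 : Int)
        else if pvBd l t (k + 1) == 99999999999999 then pvBd l t (k + 1) else pvBd l t (k + 1) + 1)
        = pvBd l t k := by
      rw [hmeq]
      conv_rhs => rw [pvBd]
      rw [dif_pos (by omega : k < l.length)]
    have hfk := hf k (by omega)
    rw [hstate, hfk]
    rw [ih (by omega) (acc ++ [min (pvFd l t (k + 1)) (pvBd l t k)])]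
    have : min (pvFd l t (k + 1)) (pvBd l t k) = pvE l t k := rfl
    rw [this]
    simp [List.range_succ, List.append_assoc]

theorem pv_B_char (palabra : String) (caracter : String) :
    representarDistanciaMasCorta_alt palabra caracter
      = (List.range (PySem.Chars.lower palabra.toList).length).map
          (pvE (PySem.Chars.lower palabra.toList) (PySem.Chars.lower caracter.toList)) := by
  unfold representarDistanciaMasCorta_alt
  simp only [PySem.List.len_eq]
  set l := PySem.Chars.lower palabra.toList with hl
  set t := PySem.Chars.lower caracter.toList with ht
  rw [pv_fwd_char l t l.length]
  have hf : ∀ i, i < l.length →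
      PySem.List.pyGetD ((List.range l.length).map (fun i => pvFd l t (i + 1))) (i : Int) 0
        = pvFd l t (i + 1) := by
    intro i hi
    rw [PySem.List.pyGetD_natCast, PySem.List.getD_map_range _ _ _ _ hi]
  rw [pv_bwd_char l t _ hf l.length le_rfl 99999999999999
        (by rw [pvBd]; simp) []]
  simp

theorem pv_main (palabra caracter : String) :
    representarDistanciaMasCorta palabra caracter = representarDistanciaMasCorta_alt palabra caracter := by
  rw [pv_A_char, pv_B_char]

-- ===== VERDICT (by name: the statement is the Claim_ definition above) =====
theorem representarDistanciaMasCorta_spec : Claim_equal_representarDistanciaMasCorta := by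
  intro palabra caracter _
  exact pv_main palabra caracter
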